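-- pv_equiv track=rewrite | github.com/atholcomb/pycodechallenges | first_before_second.py | first_before_second
-- ===== SOURCE A (Python) =====
-- def first_before_second(string, key1, key2):
--     before = []
--     after = []
--
--     # obtain positions of key1
--     for s1 in range(len(string)):
--         if string[s1] in key1:
--             before.append(s1)
--
--     # obtain positions of key2
--     for s2 in range(len(string)):
--         if string[s2] in key2:
--             after.append(s2)
--
--     # compare positions and return True or False
--     for a in after:
--         for b in before:
--             if a < b:
--                 return False
--     return True
-- ===== SOURCE B (Python) =====
-- def first_before_second(string, key1, key2):
--     # one pass: track the last position of a key1 char and the first position of a key2 char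
--     k1 = set(key1)
--     k2 = set(key2)
--     last1 = -1
--     first2 = None
--     for i, c in enumerate(string):
--         if c in k1:
--             last1 = i
--         if first2 is None and c in k2:
--             first2 = i
--     return first2 is None or first2 >= last1
-- ===== Notes on version B (the rewrite author's own statement) =====
-- stated objective: faster
-- what changed: Replaced the two index-collecting passes plus the nested all-pairs comparison loop by a single pass that tracks only the last key1 position and the first key2 position and compares them once.
import Mathlib
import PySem

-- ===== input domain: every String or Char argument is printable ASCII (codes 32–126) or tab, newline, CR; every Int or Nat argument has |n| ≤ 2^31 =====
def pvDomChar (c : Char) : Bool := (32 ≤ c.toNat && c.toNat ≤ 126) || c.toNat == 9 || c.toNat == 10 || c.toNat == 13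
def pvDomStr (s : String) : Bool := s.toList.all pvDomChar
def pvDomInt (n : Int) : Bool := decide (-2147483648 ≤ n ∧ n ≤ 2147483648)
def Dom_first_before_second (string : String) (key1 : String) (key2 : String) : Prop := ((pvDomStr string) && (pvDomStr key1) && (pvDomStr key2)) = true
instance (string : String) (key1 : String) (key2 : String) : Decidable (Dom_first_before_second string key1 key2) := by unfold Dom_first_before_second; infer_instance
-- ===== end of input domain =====

-- B replaces A's two index-collecting passes plus the nested all-pairs comparison loop by a
-- single pass tracking the last key1 position and the first key2 position, compared once.

-- ===== PORT A =====
-- 'string[s1] in key1' on the in-range index s1 is the single-char substring test,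
-- ported exactly as PySem.Chars.isIn of the one-char list.
def first_before_second (string : String) (key1 : String) (key2 : String) : Bool :=
  let cs := string.toList
  -- before = positions of key1 chars
  let before := (PySem.List.pyRange 0 (cs.length : Int) 1).foldl
    (fun acc s1 => if PySem.Chars.isIn [PySem.List.pyGetD cs s1 ' '] key1.toList then acc ++ [s1] else acc) ([] : List Int)
  -- after = positions of key2 chars
  let after := (PySem.List.pyRange 0 (cs.length : Int) 1).foldl
    (fun acc s2 => if PySem.Chars.isIn [PySem.List.pyGetD cs s2 ' '] key2.toList then acc ++ [s2] else acc) ([] : List Int)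
  -- nested loops with early 'return False' on a < b
  !(after.any (fun a => before.any (fun b => decide (a < b))))

-- ===== PORT B =====
def first_before_second_alt (string : String) (key1 : String) (key2 : String) : Bool :=
  let k1 : PySem.Set Char := PySem.Set.ofList key1.toList
  let k2 : PySem.Set Char := PySem.Set.ofList key2.toList
  let st := (PySem.List.enumerate string.toList 0).foldl
    (fun (st : Int × Option Int) p =>
      let st1 := if PySem.Set.contains k1 p.2 then (p.1, st.2) else st
      if st1.2.isNone && PySem.Set.contains k2 p.2 then (st1.1, some p.1) else st1)
    (-1, none)
  match st.2 with
  | none => true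
  | some first2 => decide (st.1 ≤ first2)

-- ===== PRECONDITION & SPEC =====
def Spec_first_before_second (string : String) (key1 : String) (key2 : String) (out : Bool) : Prop := out = first_before_second_alt string key1 key2
instance (string : String) (key1 : String) (key2 : String) (out : Bool) : Decidable (Spec_first_before_second string key1 key2 out) := by unfold Spec_first_before_second; infer_instance

-- ===== CLAIM (what is proved, stated in full; the proofs are below) =====
def Claim_equal_first_before_second : Prop := ∀ (string : String) (key1 : String) (key2 : String), Dom_first_before_second string key1 key2 → Spec_first_before_second string key1 key2 (first_before_second string key1 key2)

-- ===== LEMMAS AND PROOFS =====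

-- single-char membership: '[c] in l' is 'c ∈ l'
theorem pv_isIn_singleton (c : Char) (l : List Char) : PySem.Chars.isIn [c] l = l.contains c := by
  rcases h : PySem.Chars.isIn [c] l with _ | _
  · have := (PySem.Chars.isIn_eq_false_iff [c] l).mp h
    simp [List.singleton_infix_iff] at this
    simp [this]
  · have := (PySem.Chars.isIn_iff_infix [c] l).mp h
    simp [List.singleton_infix_iff] at this
    simp [this]

-- membership in a set built from a list is membership in the list
theorem pv_contains_ofList (l : List Char) (c : Char) :
    PySem.Set.contains (PySem.Set.ofList l) c = l.contains c := by
  simp [PySem.Set.contains]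

-- B's loop body, written with independent components
theorem pv_step_eq (p1 p2 : Int → Bool) :
    (fun (st : Int × Option Int) j =>
      let st1 := if p1 j then (j, st.2) else st
      if st1.2.isNone && p2 j then (st1.1, some j) else st1)
    = fun (st : Int × Option Int) j =>
        (if p1 j then j else st.1, if st.2.isNone && p2 j then some j else st.2) := by
  funext st j
  by_cases h1 : p1 j = true <;> by_cases h2 : st.2 = none ∧ p2 j = true <;>
    simp [h1, h2]

-- a first-match accumulator that is already set stays set
theorem pv_snd_some (p2 : Int → Bool) (l : List Int) (v : Int) :
    l.foldl (fun (o : Option Int) j => if o.isNone && p2 j then some j else o) (some v) = some v := by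
  induction l with
  | nil => rfl
  | cons a t ih => simpa using ih

-- the first-match fold is find?
theorem pv_snd_none (p2 : Int → Bool) (l : List Int) :
    l.foldl (fun (o : Option Int) j => if o.isNone && p2 j then some j else o) none = l.find? p2 := by
  induction l with
  | nil => rfl
  | cons a t ih =>
    by_cases h2 : p2 a = true
    · rw [List.find?_cons_of_pos h2]
      simpa [h2] using pv_snd_some p2 t a
    · rw [List.find?_cons_of_neg (by simp [h2])]
      simpa [h2] using ih

-- B's one-pass fold splits into the last-index fold and the first-match find
theorem pv_fold_split (p1 p2 : Int → Bool) (l : List Int) (m : Int) :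
    l.foldl (fun (st : Int × Option Int) j =>
      let st1 := if p1 j then (j, st.2) else st
      if st1.2.isNone && p2 j then (st1.1, some j) else st1) (m, none)
    = (l.foldl (fun m j => if p1 j then j else m) m, l.find? p2) := by
  rw [pv_step_eq,
    PySem.List.foldl_prod_mk (f := fun m j => if p1 j then j else m)
      (g := fun (o : Option Int) j => if o.isNone && p2 j then some j else o),
    pv_snd_none]

-- the last-index fold yields its init or a satisfying element of l
theorem pv_last_cases (p1 : Int → Bool) (l : List Int) (m : Int) :
    l.foldl (fun m j => if p1 j then j else m) m = m ∨
    (p1 (l.foldl (fun m j => if p1 j then j else m) m) = true ∧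
      l.foldl (fun m j => if p1 j then j else m) m ∈ l) := by
  induction l generalizing m with
  | nil => simp
  | cons a t ih =>
    simp only [List.foldl_cons]
    by_cases h1 : p1 a = true
    · simp only [h1, if_pos]
      rcases ih a with h | ⟨hp, hm⟩
      · right; exact ⟨by simpa [h] using h1, by simp [h]⟩
      · right; exact ⟨hp, by simp [hm]⟩
    · simp only [h1, if_neg, Bool.false_eq_true, not_false_iff]
      rcases ih m with h | ⟨hp, hm⟩
      · left; simpa using h
      · right; exact ⟨hp, by simp [hm]⟩

-- on a strictly increasing list the last-index fold bounds every satisfying element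
theorem pv_last_ub (p1 : Int → Bool) (l : List Int) (hs : l.Pairwise (· < ·)) :
    ∀ m, ∀ j ∈ l, p1 j = true → j ≤ l.foldl (fun m j => if p1 j then j else m) m := by
  induction l with
  | nil => simp
  | cons a t ih =>
    intro m j hj hp
    simp only [List.foldl_cons]
    rcases List.mem_cons.mp hj with rfl | hjt
    · simp only [hp, if_pos]
      rcases pv_last_cases p1 t j with h | ⟨_, hm⟩
      · simp [h]
      · exact le_of_lt ((List.pairwise_cons.mp hs).1 _ hm)
    · by_cases h1 : p1 a = true
      · simp only [h1, if_pos]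
        exact ih hs.tail a j hjt hp
      · simp only [h1, Bool.false_eq_true, if_neg, not_false_iff]
        exact ih hs.tail m j hjt hp

-- on a strictly increasing list find? returns a lower bound of all satisfying elements
theorem pv_find_min (p2 : Int → Bool) (l : List Int) (hs : l.Pairwise (· < ·)) (m : Int)
    (h : l.find? p2 = some m) : ∀ j ∈ l, p2 j = true → m ≤ j := by
  induction l with
  | nil => simp at h
  | cons a t ih =>
    intro j hj hp
    by_cases h2 : p2 a = true
    · rw [List.find?_cons_of_pos h2] at h
      obtain rfl := Option.some.inj h
      rcases List.mem_cons.mp hj with rfl | hjt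
      · exact le_refl _
      · exact le_of_lt ((List.pairwise_cons.mp hs).1 _ hjt)
    · rw [List.find?_cons_of_neg (by simp [h2])] at h
      rcases List.mem_cons.mp hj with rfl | hjt
      · simp [hp] at h2
      · exact ih hs.tail h j hjt hp

-- the core equivalence, over an arbitrary strictly increasing list of nonnegative positions
theorem pv_main (p1 p2 : Int → Bool) (l : List Int) (hs : l.Pairwise (· < ·))
    (hpos : ∀ j ∈ l, 0 ≤ j) :
    (!((l.filter p2).any fun a => (l.filter p1).any fun b => decide (a < b))) =
    (match l.find? p2 with
     | none => true
     | some f2 => decide (l.foldl (fun m j => if p1 j then j else m) (-1) ≤ f2)) := by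
  rcases hf : l.find? p2 with _ | f2
  · have hnone : ∀ x ∈ l, ¬ p2 x = true := by
      intro x hx hpx
      exact absurd hf (by simp [List.find?_eq_none]; exact ⟨x, hx, hpx⟩)
    have : l.filter p2 = [] := List.filter_eq_nil_iff.mpr hnone
    simp [this]
  · have hf2mem : f2 ∈ l := List.mem_of_find?_eq_some hf
    have hf2p : p2 f2 = true := List.find?_some hf
    rw [Bool.eq_iff_iff]
    have hA : ((!((l.filter p2).any fun a => (l.filter p1).any fun b => decide (a < b))) = true ↔
        ∀ a ∈ l, p2 a = true → ∀ b ∈ l, p1 b = true → ¬ (a < b)) := by simp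
    rw [hA, decide_eq_true_eq]
    constructor
    · intro hno
      rcases pv_last_cases p1 l (-1) with h | ⟨hp, hm⟩
      · rw [h]
        have := hpos f2 hf2mem
        omega
      · have hnl := hno f2 hf2mem hf2p _ hm hp
        omega
    · intro hle a ha hpa b hb hpb
      have h1 := pv_last_ub p1 l hs (-1) b hb hpb
      have h2 := pv_find_min p2 l hs f2 hf a ha hpa
      omega

-- ===== VERDICT (by name: the statement is the Claim_ definition above) =====
theorem first_before_second_spec : Claim_equal_first_before_second := by
  intro string key1 key2 _
  unfold Spec_first_before_second first_before_second first_before_second_alt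
  simp only [pv_isIn_singleton, pv_contains_ofList,
    PySem.List.enumerate_eq_map_pyRange (d := ' '), List.foldl_map,
    PySem.List.foldl_append_if_eq_filter, List.nil_append, PySem.List.len_eq,
    pv_fold_split]
  exact pv_main (fun j => key1.toList.contains (PySem.List.pyGetD string.toList j ' '))
    (fun j => key2.toList.contains (PySem.List.pyGetD string.toList j ' '))
    (PySem.List.pyRange 0 (string.toList.length : Int) 1)
    (PySem.List.pairwise_lt_pyRange_one 0 _)
    (fun j hj => ((PySem.List.mem_pyRange_one).mp hj).1)
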